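-- pv_equiv track=rewrite | github.com/Fr4n13Z/PKGN | psy_metrics/liwc_metrics.py | words2categories
-- ===== SOURCE A (Python) =====
-- def words2categories(words_to_categories, word):
--     word_categories = []
--     try:
--         word_categories = words_to_categories[word]
--         return word_categories
--     except:
--         for i in range(len(word)):
--             try:
--                 word_categories = words_to_categories[word[:i + 1] + '*']
--             except:
--                 continue
--     return word_categories
-- ===== SOURCE B (Python) =====
-- def words2categories(words_to_categories, word):
--     try:
--         return words_to_categories[word]
--     except:
--         pass
--     for i in range(len(word), 0, -1):
--         try:
--             return words_to_categories[word[:i] + '*']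
--         except:
--             continue
--     return []
-- ===== Notes on version B (the rewrite author's own statement) =====
-- stated objective: simpler
-- what changed: B returns immediately on the exact match and then scans wildcard prefixes from longest to shortest, returning the first hit (early exit), instead of A's short-to-long scan that keeps overwriting an accumulator so the last hit survives.
import Mathlib
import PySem

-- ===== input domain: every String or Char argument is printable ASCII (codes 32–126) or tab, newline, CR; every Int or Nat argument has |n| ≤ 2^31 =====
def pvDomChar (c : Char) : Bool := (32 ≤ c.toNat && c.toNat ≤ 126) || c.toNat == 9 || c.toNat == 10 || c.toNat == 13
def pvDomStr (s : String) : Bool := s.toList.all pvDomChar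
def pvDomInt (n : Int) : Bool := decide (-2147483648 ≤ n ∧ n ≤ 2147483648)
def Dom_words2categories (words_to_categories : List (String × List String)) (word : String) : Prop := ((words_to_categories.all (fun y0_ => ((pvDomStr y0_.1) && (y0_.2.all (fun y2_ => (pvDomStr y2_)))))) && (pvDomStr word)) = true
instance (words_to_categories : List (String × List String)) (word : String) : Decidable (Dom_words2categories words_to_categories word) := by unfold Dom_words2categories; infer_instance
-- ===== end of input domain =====

-- B replaces A's short-to-long prefix scan with accumulator overwrite by an early-exit
-- longest-first scan returning the first wildcard hit (objective: simpler).

-- dict lookup (first match; Python raises KeyError on a miss → none)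
def pvLookup? (d : List (String × List String)) (k : String) : Option (List String) :=
  (d.find? (fun p => p.1 == k)).map (·.2)

-- ===== PORT A =====
-- A: word_categories = []; try exact lookup and return; on KeyError loop i in range(len(word)),
-- overwriting word_categories on each successful lookup of word[:i+1]+'*'.
def words2categories (words_to_categories : List (String × List String)) (word : String) : List String :=
  match pvLookup? words_to_categories word with
  | some cs => cs
  | none =>
    (PySem.List.pyRange 0 (PySem.Str.len word) 1).foldl
      (fun acc i =>
        match pvLookup? words_to_categories (PySem.Str.slice word none (some (i + 1)) ++ "*") with
        | some cs => cs
        | none => acc) []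

-- ===== PORT B =====
-- Source B's loop 'for i in range(len(word), 0, -1): return on first hit' as countdown recursion on i.
def altPrefixLoop (words_to_categories : List (String × List String)) (word : String) : Nat → List String
  | 0 => []
  | n + 1 =>
    match pvLookup? words_to_categories (PySem.Str.slice word none (some ((n : Int) + 1)) ++ "*") with
    | some cs => cs
    | none => altPrefixLoop words_to_categories word n

def words2categories_alt (words_to_categories : List (String × List String)) (word : String) : List String :=
  match pvLookup? words_to_categories word with
  | some cs => cs
  | none => altPrefixLoop words_to_categories word word.toList.length

-- ===== PRECONDITION & SPEC =====
def Spec_words2categories (words_to_categories : List (String × List String)) (word : String) (out : List String) : Prop := out = words2categories_alt words_to_categories word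
instance (words_to_categories : List (String × List String)) (word : String) (out : List String) : Decidable (Spec_words2categories words_to_categories word out) := by unfold Spec_words2categories; infer_instance

-- ===== CLAIM (what is proved, stated in full; the proofs are below) =====
def Claim_equal_words2categories : Prop := ∀ (words_to_categories : List (String × List String)) (word : String), Dom_words2categories words_to_categories word → Spec_words2categories words_to_categories word (words2categories words_to_categories word)

-- ===== LEMMAS AND PROOFS =====

-- A's left fold over range n (overwrite = last successful lookup survives) equals B's
-- countdown early-exit recursion (first successful lookup from the top).
theorem loop_eq (wtc : List (String × List String)) (word : String) :
    ∀ n : Nat,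
      (List.range n).foldl
        (fun acc (k : Nat) =>
          match pvLookup? wtc (PySem.Str.slice word none (some ((k : Int) + 1)) ++ "*") with
          | some cs => cs
          | none => acc) []
      = altPrefixLoop wtc word n := by
  intro n
  induction n with
  | zero => rfl
  | succ m ih =>
    rw [List.range_succ, List.foldl_append, ih]
    simp only [List.foldl_cons, List.foldl_nil, altPrefixLoop]

-- ===== VERDICT (by name: the statement is the Claim_ definition above) =====
theorem words2categories_spec : Claim_equal_words2categories := by
  intro wtc word _
  unfold Spec_words2categories words2categories words2categories_alt
  cases pvLookup? wtc word with
  | some cs => rfl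
  | none =>
    simp only
    rw [show PySem.Str.len word = ((word.toList.length : Nat) : Int) from by
          simp [PySem.Str.len_eq],
        PySem.List.pyRange_one, List.foldl_map]
    simp only [Int.sub_zero, Int.toNat_natCast, Int.zero_add]
    exact loop_eq wtc word word.toList.length
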